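-- pv_equiv track=rewrite | github.com/kaneplusplus/stat_agg | del_test.py | get_actual
-- ===== SOURCE A (Python) =====
-- def get_actual(filenames, features):
--   ret=[]
--   for fn in filenames:
--     found=False
--     for feat in features:
--       if feat in fn:
--         ret.append(feat)
--         found=True
--         break
--     if not found:
--       ret.append(None)
--   return(ret)
-- ===== SOURCE B (Python) =====
-- def get_actual(filenames, features):
--   # Feature-major pass: each feature claims the still-unmatched filenames;
--   # a pending index list shrinks, so each slot is filled once, by the
--   # first-listed feature that matches it (same result as A).
--   res = [None] * len(filenames)
--   pending = list(range(len(filenames)))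
--   for feat in features:
--     if not pending:
--       break
--     still = []
--     for i in pending:
--       if feat in filenames[i]:
--         res[i] = feat
--       else:
--         still.append(i)
--     pending = still
--   return res
-- ===== Notes on version B (the rewrite author's own statement) =====
-- stated objective: alternative
-- what changed: Loop nesting is inverted: B makes one pass per feature over a shrinking pending-index list of still-unmatched filenames (filling a preallocated result and breaking when none remain), instead of A's per-filename inner scan over all features with break.
import Mathlib
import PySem

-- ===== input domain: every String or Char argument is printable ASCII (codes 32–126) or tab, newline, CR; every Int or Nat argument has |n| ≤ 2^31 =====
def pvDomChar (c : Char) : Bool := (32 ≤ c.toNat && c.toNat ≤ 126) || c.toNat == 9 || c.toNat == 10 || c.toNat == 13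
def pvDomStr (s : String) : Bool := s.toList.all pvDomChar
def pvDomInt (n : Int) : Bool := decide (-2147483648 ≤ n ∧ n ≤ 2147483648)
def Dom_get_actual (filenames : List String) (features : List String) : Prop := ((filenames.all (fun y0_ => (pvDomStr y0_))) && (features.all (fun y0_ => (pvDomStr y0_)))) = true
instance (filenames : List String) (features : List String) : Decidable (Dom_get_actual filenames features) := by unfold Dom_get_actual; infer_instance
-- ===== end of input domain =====

-- B inverts the loop nesting: one pass per feature over a shrinking pending-index list of
-- still-unmatched filenames, instead of A's per-filename inner scan with break; same cost,
-- alternative structure.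

-- ===== PORT A =====
-- inner loop of A: scan features, append the first one contained in fn (break), else None
def getActualInner (features : List String) (fn : String) : Option String :=
  match features with
  | [] => none
  | feat :: rest => if PySem.Str.isIn feat fn then some feat else getActualInner rest fn

def get_actual (filenames : List String) (features : List String) : List (Option String) :=
  filenames.foldl (fun ret fn => ret ++ [getActualInner features fn]) []

-- ===== PORT B =====
-- inner loop of B: one pass of feature `feat` over the pending indices
def altStep (filenames : List String) (feat : String)
    (res : List (Option String)) (pending : List Nat) : List (Option String) × List Nat :=
  pending.foldl
    (fun acc i =>
      if PySem.Str.isIn feat (filenames.getD i "") then (acc.1.set i (some feat), acc.2)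
      else (acc.1, acc.2 ++ [i]))
    (res, [])

-- outer loop of B: one iteration per feature, with the early break when pending is empty
def altGo (filenames : List String) (feats : List String)
    (res : List (Option String)) (pending : List Nat) : List (Option String) :=
  match feats with
  | [] => res
  | feat :: rest =>
      if pending.isEmpty then res
      else
        let st := altStep filenames feat res pending
        altGo filenames rest st.1 st.2

def get_actual_alt (filenames : List String) (features : List String) : List (Option String) :=
  altGo filenames features (filenames.map (fun _ => none)) (List.range filenames.length)

-- ===== PRECONDITION & SPEC =====
def Spec_get_actual (filenames : List String) (features : List String) (out : List (Option String)) : Prop := out = get_actual_alt filenames features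
instance (filenames : List String) (features : List String) (out : List (Option String)) : Decidable (Spec_get_actual filenames features out) := by unfold Spec_get_actual; infer_instance

-- ===== CLAIM (what is proved, stated in full; the proofs are below) =====
def Claim_equal_get_actual : Prop := ∀ (filenames : List String) (features : List String), Dom_get_actual filenames features → Spec_get_actual filenames features (get_actual filenames features)

-- ===== LEMMAS AND PROOFS =====

-- the result/pending state after A-prefix P has been processed, expressed over indices
def resOf (fns : List String) (P : List String) : List (Option String) :=
  (List.range fns.length).map (fun i => getActualInner P (fns.getD i ""))

def pendOf (fns : List String) (P : List String) : List Nat :=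
  (List.range fns.length).filter (fun i => (getActualInner P (fns.getD i "")).isNone)

theorem gAI_append (P Q : List String) (fn : String) :
    getActualInner (P ++ Q) fn = (getActualInner P fn).or (getActualInner Q fn) := by
  induction P with
  | nil => rfl
  | cons f rest ih =>
      simp only [List.cons_append, getActualInner]
      split_ifs <;> simp [ih]

-- the pair fold splits into a result fold and a filter producing the new pending list
theorem step_split (fns : List String) (feat : String) :
    ∀ (pend : List Nat) (res : List (Option String)) (acc2 : List Nat),
    pend.foldl
      (fun acc i =>
        if PySem.Str.isIn feat (fns.getD i "") then (acc.1.set i (some feat), acc.2)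
        else (acc.1, acc.2 ++ [i]))
      (res, acc2)
    = (pend.foldl
        (fun r i => if PySem.Str.isIn feat (fns.getD i "") then r.set i (some feat) else r) res,
       acc2 ++ pend.filter (fun i => !(PySem.Str.isIn feat (fns.getD i "")))) := by
  intro pend
  induction pend with
  | nil => intro res acc2; simp
  | cons i tl ih =>
      intro res acc2
      simp only [List.foldl_cons, List.filter_cons]
      by_cases h : PySem.Str.isIn feat (fns.getD i "") = true
      · have hn : ¬ ((!PySem.Str.isIn feat (fns.getD i "")) = true) := by rw [h]; decide
        rw [if_pos h, if_pos h, ih, if_neg hn]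
      · have hx : PySem.Str.isIn feat (fns.getD i "") = false := by
          revert h; cases PySem.Str.isIn feat (fns.getD i "") <;> simp
        have hb : (!PySem.Str.isIn feat (fns.getD i "")) = true := by rw [hx]; decide
        rw [if_neg h, if_neg h, ih, if_pos hb]
        simp

theorem set_map_range (n : Nat) (g : Nat → Option String) (i0 : Nat) (h : i0 < n)
    (v : Option String) :
    ((List.range n).map g).set i0 v = (List.range n).map (fun i => if i = i0 then v else g i) := by
  apply List.ext_getElem (by simp)
  intro j h1 h2
  simp only [List.length_map, List.length_range] at h1 h2
  simp only [List.getElem_set, List.getElem_map, List.getElem_range]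
  by_cases hj : j = i0
  · subst hj; rfl
  · rw [if_neg (fun h' => hj h'.symm), if_neg hj]

-- setting (pairwise-distinct, in-range) indices of a range-map, one by one
theorem fold_set_map (n : Nat) (v : Option String) (q : Nat → Bool) :
    ∀ (ixs : List Nat) (g : Nat → Option String), ixs.Nodup → (∀ i ∈ ixs, i < n) →
    ixs.foldl (fun r i => if q i then r.set i v else r) ((List.range n).map g)
    = (List.range n).map (fun i => if i ∈ ixs ∧ q i then v else g i) := by
  intro ixs
  induction ixs with
  | nil => intro g _ _; simp
  | cons i0 tl ih =>
      intro g hnd hlt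
      have hi0 : i0 < n := hlt i0 (by simp)
      have hnd' : tl.Nodup := (List.nodup_cons.mp hnd).2
      have hni : i0 ∉ tl := (List.nodup_cons.mp hnd).1
      simp only [List.foldl_cons]
      by_cases hq : q i0 = true
      · rw [if_pos hq, set_map_range n g i0 hi0 v,
          ih _ hnd' (fun i hi => hlt i (by simp [hi]))]
        refine List.map_congr_left (fun i _ => ?_)
        by_cases hi : i = i0
        · subst hi; simp [hq, hni]
        · by_cases hm : i ∈ tl <;> simp [hi, hm]
      · rw [if_neg hq, ih _ hnd' (fun i hi => hlt i (by simp [hi]))]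
        refine List.map_congr_left (fun i _ => ?_)
        by_cases hi : i = i0
        · subst hi; simp [hq, hni]
        · by_cases hm : i ∈ tl <;> simp [hi, hm]

theorem altStep_spec (fns : List String) (P : List String) (feat : String) :
    altStep fns feat (resOf fns P) (pendOf fns P)
      = (resOf fns (P ++ [feat]), pendOf fns (P ++ [feat])) := by
  unfold altStep
  rw [step_split]
  have hnd : (pendOf fns P).Nodup := (List.nodup_range).filter _
  have hlt : ∀ i ∈ pendOf fns P, i < fns.length := by
    intro i hi
    have := List.mem_filter.mp hi
    simpa using List.mem_range.mp this.1
  refine Prod.ext ?_ ?_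
  · show (pendOf fns P).foldl _ (resOf fns P) = _
    unfold resOf
    rw [fold_set_map fns.length (some feat) (fun i => PySem.Str.isIn feat (fns.getD i ""))
      (pendOf fns P) _ hnd hlt]
    refine List.map_congr_left (fun i hi => ?_)
    have hmem : i ∈ pendOf fns P ↔ (getActualInner P (fns.getD i "")).isNone = true := by
      unfold pendOf
      simp [List.mem_filter, hi]
    rw [gAI_append]
    generalize hfn : fns.getD i "" = fn at hmem ⊢
    cases hA : getActualInner P fn with
    | some v => simp [hmem, hA]
    | none =>
        have : i ∈ pendOf fns P := hmem.mpr (by simp [hA])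
        simp [this, getActualInner, Option.or]
  · show [] ++ _ = _
    rw [List.nil_append]
    unfold pendOf
    rw [List.filter_filter]
    refine List.filter_congr (fun i _ => ?_)
    rw [gAI_append]
    generalize hfn : fns.getD i "" = fn
    cases hA : getActualInner P fn with
    | some v => simp [Option.or]
    | none =>
        simp only [getActualInner, Option.or, PySem.Str.isIn]
        cases PySem.Chars.isIn feat.toList fn.toList <;> simp

theorem altGo_spec (fns : List String) :
    ∀ (rest P : List String), altGo fns rest (resOf fns P) (pendOf fns P) = resOf fns (P ++ rest) := by
  intro rest
  induction rest with
  | nil => intro P; simp [altGo]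
  | cons feat rest ih =>
      intro P
      by_cases hp : (pendOf fns P).isEmpty = true
      · simp only [altGo, hp, if_pos]
        have hall : ∀ i ∈ List.range fns.length,
            ¬ ((getActualInner P (fns.getD i "")).isNone = true) := by
          have := List.isEmpty_iff.mp hp
          unfold pendOf at this
          intro i hi hcon
          have : i ∈ ([] : List Nat) := this ▸ List.mem_filter.mpr ⟨hi, hcon⟩
          simp at this
        unfold resOf
        refine List.map_congr_left (fun i hi => ?_)
        have := hall i hi
        generalize hfn : fns.getD i "" = fn at this ⊢
        cases hA : getActualInner P fn with
        | none => exact absurd (by simp [hA]) this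
        | some v => rw [gAI_append, hA]; rfl
      · simp only [altGo, hp, if_neg, Bool.not_eq_true]
        rw [altStep_spec fns P feat, ih (P ++ [feat])]
        simp

theorem resOf_eq (fns : List String) (P : List String) :
    resOf fns P = fns.map (getActualInner P) := by
  apply List.ext_getElem (by simp [resOf])
  intro i h1 h2
  simp only [resOf, List.length_map, List.length_range] at h1 ⊢
  simp only [List.getElem_map, List.getElem_range]
  congr 1
  simp only [List.length_map] at h2
  rw [List.getD_eq_getElem?_getD, List.getElem?_eq_getElem h2, Option.getD_some]

theorem resOf_nil (fns : List String) : resOf fns [] = fns.map (fun _ => none) := by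
  simp [resOf, getActualInner, List.map_const']

theorem pendOf_nil (fns : List String) : pendOf fns [] = List.range fns.length := by
  simp [pendOf, getActualInner]

-- ===== VERDICT (by name: the statement is the Claim_ definition above) =====
theorem get_actual_spec : Claim_equal_get_actual := by
  intro filenames features _
  show get_actual filenames features = get_actual_alt filenames features
  rw [get_actual, PySem.List.foldl_append_singleton_eq_map, List.nil_append,
    get_actual_alt, ← resOf_nil, ← pendOf_nil, altGo_spec, List.nil_append, resOf_eq]
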